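-- pv_equiv track=rewrite | github.com/chi-collective/genparse | bench/schema_grammar_coverage.py | reformat_grammar
-- ===== SOURCE A (Python) =====
-- def reformat_grammar(grammar):
--     """move start rule and remove zero-width rules"""
--     lines = grammar.split('\n')
--     new_grammar = ''
--     for line in lines:
--         if line == '|""i':
--             continue
--         if line.startswith('start'):
--             new_grammar = line + '\n' + new_grammar
--         else:
--             new_grammar += line + '\n'
--
--     return new_grammar
-- ===== SOURCE B (Python) =====
-- def reformat_grammar(grammar):
--     """move start rule and remove zero-width rules"""
--     lines = grammar.split('\n')
--     starts = [line for line in lines if line.startswith('start')]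
--     others = [line for line in lines
--               if not line.startswith('start') and line != '|""i']
--     return (''.join(line + '\n' for line in reversed(starts))
--             + ''.join(line + '\n' for line in others))
-- ===== Notes on version B (the rewrite author's own statement) =====
-- stated objective: simpler
-- what changed: Replaces A's single loop that prepends/appends onto one growing string with a partition of the lines into start lines and kept other lines, joined as reversed starts followed by others.
import Mathlib
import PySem

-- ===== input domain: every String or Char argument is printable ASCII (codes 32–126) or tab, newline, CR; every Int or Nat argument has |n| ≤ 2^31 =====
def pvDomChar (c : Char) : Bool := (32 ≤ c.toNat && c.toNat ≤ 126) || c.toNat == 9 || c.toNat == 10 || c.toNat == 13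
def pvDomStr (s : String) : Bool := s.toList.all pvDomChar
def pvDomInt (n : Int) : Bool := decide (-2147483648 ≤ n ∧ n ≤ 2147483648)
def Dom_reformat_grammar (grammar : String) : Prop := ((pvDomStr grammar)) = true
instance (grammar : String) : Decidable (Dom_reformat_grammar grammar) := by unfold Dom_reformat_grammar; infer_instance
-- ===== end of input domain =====

-- B partitions the split lines into start lines and kept other lines and joins them
-- (reversed starts first), instead of A's single loop prepending/appending onto one growing string.

-- ===== PORT A =====
def reformat_grammar (grammar : String) : String :=
  -- grammar.split('\n'): the separator "\n" is nonempty, so Str.split? is always `some`; getD [] is never used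
  let lines : List String := (PySem.Str.split? grammar "\n").getD []
  lines.foldl (fun new_grammar line =>
    if line == "|\"\"i" then new_grammar
    else if PySem.Str.startswith line "start" then line ++ "\n" ++ new_grammar
    else new_grammar ++ (line ++ "\n")) ""

-- ===== PORT B =====
def reformat_grammar_alt (grammar : String) : String :=
  let lines : List String := (PySem.Str.split? grammar "\n").getD []
  let starts := lines.filter (fun line => PySem.Str.startswith line "start")
  let others := lines.filter (fun line =>
    !(PySem.Str.startswith line "start") && !(line == "|\"\"i"))
  PySem.Str.join "" (starts.reverse.map (fun line => line ++ "\n")) ++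
    PySem.Str.join "" (others.map (fun line => line ++ "\n"))

-- ===== PRECONDITION & SPEC =====
def Spec_reformat_grammar (grammar : String) (out : String) : Prop := out = reformat_grammar_alt grammar
instance (grammar : String) (out : String) : Decidable (Spec_reformat_grammar grammar out) := by unfold Spec_reformat_grammar; infer_instance

-- ===== CLAIM (what is proved, stated in full; the proofs are below) =====
def Claim_equal_reformat_grammar : Prop := ∀ (grammar : String), Dom_reformat_grammar grammar → Spec_reformat_grammar grammar (reformat_grammar grammar)

-- ===== LEMMAS AND PROOFS =====

-- join of per-line "+'\n'" strings, the shape both sides of the proof reduce to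
def pvJ (xs : List String) : String := PySem.Str.join "" (xs.map (fun l => l ++ "\n"))

theorem pvJ_nil : pvJ [] = "" := rfl

theorem pvJ_cons (x : String) (xs : List String) :
    pvJ (x :: xs) = x ++ "\n" ++ pvJ xs := by
  apply String.toList_inj.mp
  cases xs <;>
    simp [pvJ, PySem.Str.join, PySem.Chars.join_cons_cons, PySem.Chars.join_singleton,
      String.toList_append]

theorem pvJ_append_singleton (xs : List String) (x : String) :
    pvJ (xs ++ [x]) = pvJ xs ++ (x ++ "\n") := by
  induction xs with
  | nil => simp [pvJ_nil, pvJ_cons]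
  | cons y ys ih =>
      simp only [List.cons_append, pvJ_cons, ih, String.append_assoc]

-- the invariant of A's loop: the accumulator sits between the (reversed) start lines
-- collected so far and the kept other lines
theorem pvLoopA (lines : List String) (acc : String) :
    lines.foldl (fun new_grammar line =>
        if line == "|\"\"i" then new_grammar
        else if PySem.Str.startswith line "start" then line ++ "\n" ++ new_grammar
        else new_grammar ++ (line ++ "\n")) acc
      = pvJ ((lines.filter (fun l => PySem.Str.startswith l "start")).reverse) ++ acc ++
        pvJ (lines.filter (fun l => !(PySem.Str.startswith l "start") && !(l == "|\"\"i"))) := by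
  induction lines generalizing acc with
  | nil => simp [pvJ_nil, String.append_empty, String.empty_append]
  | cons l ls ih =>
      by_cases hz : (l == "|\"\"i") = true
      · have hl : l = "|\"\"i" := by simpa using hz
        have hst : PySem.Str.startswith l "start" = false := by subst hl; decide
        simp only [List.foldl_cons, List.filter_cons, hz, hst, if_true,
          Bool.not_true, Bool.and_false, if_false, Bool.false_eq_true]
        exact ih acc
      · have hz' : (l == "|\"\"i") = false := by simpa using hz
        by_cases hst : PySem.Str.startswith l "start" = true
        · simp only [List.foldl_cons, List.filter_cons, hz', hst, if_true, Bool.not_true,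
            Bool.false_and, if_false, Bool.false_eq_true, List.reverse_cons,
            pvJ_append_singleton]
          rw [ih (l ++ "\n" ++ acc)]
          simp [String.append_assoc]
        · have hst' : PySem.Str.startswith l "start" = false := by simpa using hst
          simp only [List.foldl_cons, List.filter_cons, hz', hst', if_false, Bool.not_false,
            Bool.true_and, if_true, Bool.false_eq_true]
          rw [ih (acc ++ (l ++ "\n"))]
          simp [pvJ_cons, String.append_assoc]

-- ===== VERDICT (by name: the statement is the Claim_ definition above) =====
theorem reformat_grammar_spec : Claim_equal_reformat_grammar := by
  intro grammar _
  unfold Spec_reformat_grammar reformat_grammar reformat_grammar_alt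
  rw [pvLoopA]
  simp [pvJ, String.append_empty]
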